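-- pv_equiv track=rewrite | github.com/cfi2017/advent-of-code | 2020/day_11/main.py | surrounding_recursive
-- ===== SOURCE A (Python) =====
-- def surrounding_recursive(g, x, y, direction_x, direction_y, cache=None):
--     if cache is None:
--         cache = {}
--     c_key = (x, y, direction_x, direction_y)
--     if c_key in cache:
--         return cache[c_key]
--     check_x = x + direction_x
--     check_y = y + direction_y
--     if 0 <= check_x < len(g) and 0 <= check_y < len(g[0]):
--         val = g[check_x][check_y]
--         if val != '.':
--             cache[c_key] = val == '#'
--             return cache[c_key]
--         else:
--             rec = surrounding_recursive(g, check_x, check_y, direction_x, direction_y, cache)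
--             cache[c_key] = rec
--             return rec
--     else:
--         cache[c_key] = False
--         return False
-- ===== SOURCE B (Python) =====
-- def surrounding_recursive(g, x, y, direction_x, direction_y, cache=None):
--     # Bounded for-loop over step indices t with arithmetic positions (x+t*dx, y+t*dy)
--     # instead of A's recursion; cache keys are written back in one batch at the end.
--     if cache is None:
--         cache = {}
--     rows = len(g)
--     cols = len(g[0]) if g else 0
--     outcome = False
--     steps = 0
--     for t in range(rows + cols + 2):
--         key = (x + t * direction_x, y + t * direction_y, direction_x, direction_y)
--         if key in cache:
--             outcome = cache[key]
--             steps = t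
--             break
--         nx = x + (t + 1) * direction_x
--         ny = y + (t + 1) * direction_y
--         if not (0 <= nx < rows and 0 <= ny < cols):
--             outcome = False
--             steps = t + 1
--             break
--         cell = g[nx][ny]
--         if cell != '.':
--             outcome = cell == '#'
--             steps = t + 1
--             break
--     for t in range(steps):
--         cache[(x + t * direction_x, y + t * direction_y, direction_x, direction_y)] = outcome
--     return outcome
-- ===== Notes on version B (the rewrite author's own statement) =====
-- stated objective: alternative
-- what changed: Replaces A's recursion (with post-return cache write-backs) by a bounded for-loop over step indices t that computes each ray position arithmetically as (x+t*dx, y+t*dy) and writes the final boolean back to the visited keys in one batch; return value and cache mutation are identical.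
import Mathlib
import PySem

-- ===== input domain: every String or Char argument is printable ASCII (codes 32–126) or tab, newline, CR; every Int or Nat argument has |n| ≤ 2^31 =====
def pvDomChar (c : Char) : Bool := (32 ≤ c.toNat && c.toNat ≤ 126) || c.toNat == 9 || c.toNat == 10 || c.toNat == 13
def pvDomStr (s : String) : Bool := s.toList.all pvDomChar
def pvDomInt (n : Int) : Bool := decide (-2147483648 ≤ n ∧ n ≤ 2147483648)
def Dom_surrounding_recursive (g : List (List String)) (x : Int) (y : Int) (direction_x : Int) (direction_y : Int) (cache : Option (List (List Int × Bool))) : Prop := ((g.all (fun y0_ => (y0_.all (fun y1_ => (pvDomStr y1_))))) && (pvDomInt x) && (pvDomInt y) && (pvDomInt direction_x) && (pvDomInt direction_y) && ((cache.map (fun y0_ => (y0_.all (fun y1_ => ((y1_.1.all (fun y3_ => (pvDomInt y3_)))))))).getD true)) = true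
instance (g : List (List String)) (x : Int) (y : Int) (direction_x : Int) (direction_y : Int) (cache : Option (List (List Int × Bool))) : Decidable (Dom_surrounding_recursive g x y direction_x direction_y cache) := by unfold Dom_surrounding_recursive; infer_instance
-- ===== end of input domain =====

-- B replaces A's recursion by a bounded for-loop over step indices t, computing each ray position
-- arithmetically as (x+t*dx, y+t*dy), with a batch cache write-back (different decomposition, same cost).
-- Both A and B mutate the supplied `cache` identically in Python (same keys, same final boolean; A writes
-- them deepest-first, B front-to-back); the equivalence proved here is about the RETURN value only.
-- Fuel note: both ports run at most len(g) + len(g[0]) + 2 iterations; whenever the Python A terminates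
-- normally the walk stops within that bound (a straight ray with a nonzero direction leaves the grid within
-- max(rows, cols) steps), so the bound is never exhausted there; where Python A raises (IndexError on a
-- ragged grid, RecursionError for a zero direction on an open floor cell) the ports still return and the
-- equality A = B below holds vacuously about Python behaviour.

-- ===== PORT A =====
-- A's recursion, cache threaded through (Python mutates it); returns (value, cache).
def srA_go (g : List (List String)) : Nat → Int → Int → Int → Int →
    PySem.Dict (List Int) Bool → Bool × PySem.Dict (List Int) Bool
  | 0, _, _, _, _, cache => (false, cache)   -- fuel exhausted (unreachable when the Python terminates)
  | fuel+1, x, y, dx, dy, cache =>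
    let c_key : List Int := [x, y, dx, dy]
    match PySem.Dict.get? cache c_key with
    | some v => (v, cache)
    | none =>
      let check_x := x + dx
      let check_y := y + dy
      if 0 ≤ check_x ∧ check_x < (g.length : Int) ∧ 0 ≤ check_y ∧ check_y < ((g.headD []).length : Int) then
        -- g[check_x][check_y]; the .getD "" defaults apply only where Python would raise IndexError
        let val := (PySem.List.pyGet? ((PySem.List.pyGet? g check_x).getD []) check_y).getD ""
        if val ≠ "." then
          let cache := PySem.Dict.insert cache c_key (val == "#")
          (PySem.Dict.getD cache c_key false, cache)   -- 'return cache[c_key]' after the write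
        else
          let r := srA_go g fuel check_x check_y dx dy cache
          (r.1, PySem.Dict.insert r.2 c_key r.1)
      else
        (false, PySem.Dict.insert cache c_key false)

def surrounding_recursive (g : List (List String)) (x : Int) (y : Int) (direction_x : Int) (direction_y : Int) (cache : Option (List (List Int × Bool))) : Bool :=
  (srA_go g (g.length + (g.headD []).length + 2) x y direction_x direction_y
    (PySem.Dict.mk (cache.getD []))).1

-- ===== PORT B =====
-- Source B's loop body for step index t; the accumulator is `none` while the loop is still running and
-- `some outcome` once it broke (Source B's `steps` only feeds the cache write-back, not the return value,
-- so it is not modeled).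
def srB_step (g : List (List String)) (rows cols x y dx dy : Int)
    (cache : PySem.Dict (List Int) Bool) (acc : Option Bool) (t : Int) : Option Bool :=
  match acc with
  | some r => some r   -- the loop already broke
  | none =>
    let key : List Int := [x + t * dx, y + t * dy, dx, dy]
    match PySem.Dict.get? cache key with
    | some v => some v
    | none =>
      let nx := x + (t + 1) * dx
      let ny := y + (t + 1) * dy
      if ¬ (0 ≤ nx ∧ nx < rows ∧ 0 ≤ ny ∧ ny < cols) then some false
      else
        let cell := (PySem.List.pyGet? ((PySem.List.pyGet? g nx).getD []) ny).getD ""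
        if cell ≠ "." then some (cell == "#") else none

def surrounding_recursive_alt (g : List (List String)) (x : Int) (y : Int) (direction_x : Int) (direction_y : Int) (cache : Option (List (List Int × Bool))) : Bool :=
  let rows : Int := g.length
  let cols : Int := (g.headD []).length
  ((PySem.List.pyRange 0 (rows + cols + 2) 1).foldl
      (srB_step g rows cols x y direction_x direction_y (PySem.Dict.mk (cache.getD []))) none).getD false

-- ===== PRECONDITION & SPEC =====
def Spec_surrounding_recursive (g : List (List String)) (x : Int) (y : Int) (direction_x : Int) (direction_y : Int) (cache : Option (List (List Int × Bool))) (out : Bool) : Prop := out = surrounding_recursive_alt g x y direction_x direction_y cache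
instance (g : List (List String)) (x : Int) (y : Int) (direction_x : Int) (direction_y : Int) (cache : Option (List (List Int × Bool))) (out : Bool) : Decidable (Spec_surrounding_recursive g x y direction_x direction_y cache out) := by unfold Spec_surrounding_recursive; infer_instance

-- ===== CLAIM =====
def Claim_equal_surrounding_recursive : Prop := ∀ (g : List (List String)) (x : Int) (y : Int) (direction_x : Int) (direction_y : Int) (cache : Option (List (List Int × Bool))), Dom_surrounding_recursive g x y direction_x direction_y cache → Spec_surrounding_recursive g x y direction_x direction_y cache (surrounding_recursive g x y direction_x direction_y cache)

-- ===== LEMMAS AND PROOFS =====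
-- Once Source B's loop broke (acc = some r), the remaining iterations are no-ops.
theorem srB_foldl_some (g : List (List String)) (rows cols x y dx dy : Int)
    (cache : PySem.Dict (List Int) Bool) (r : Bool) :
    ∀ (l : List Int), l.foldl (srB_step g rows cols x y dx dy cache) (some r) = some r := by
  intro l
  induction l with
  | nil => rfl
  | cons a l ih => simpa [srB_step] using ih

-- Core lemma: folding Source B's loop body over the n step indices t, t+1, …, t+n-1 computes exactly
-- A's n-fuel recursion started at position (x + t·dx, y + t·dy).
theorem srB_fold_eq_srA (g : List (List String)) (x y dx dy : Int)
    (cache : PySem.Dict (List Int) Bool) :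
    ∀ (n : Nat) (t : Int),
      (((PySem.List.pyRange t (t + (n : Int)) 1).foldl
          (srB_step g (g.length : Int) ((g.headD []).length : Int) x y dx dy cache) none).getD false)
        = (srA_go g n (x + t * dx) (y + t * dy) dx dy cache).1 := by
  intro n
  induction n with
  | zero =>
    intro t
    rw [PySem.List.pyRange_one_eq_nil (by omega)]
    rfl
  | succ n ih =>
    intro t
    rw [PySem.List.pyRange_one_cons (by omega), List.foldl_cons]
    have hstep : t + ((n + 1 : Nat) : Int) = (t + 1) + (n : Int) := by push_cast; ring
    rw [hstep]
    simp only [srA_go, srB_step]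
    cases hget : PySem.Dict.get? cache [x + t * dx, y + t * dy, dx, dy] with
    | some v => simp [srB_foldl_some]
    | none =>
      have hx : x + t * dx + dx = x + (t + 1) * dx := by ring
      have hy : y + t * dy + dy = y + (t + 1) * dy := by ring
      by_cases hb : 0 ≤ x + (t + 1) * dx ∧ x + (t + 1) * dx < (g.length : Int) ∧
          0 ≤ y + (t + 1) * dy ∧ y + (t + 1) * dy < ((g.headD []).length : Int)
      · rw [if_neg (not_not_intro hb)]
        rw [hx, hy, if_pos hb]
        by_cases hv : (PySem.List.pyGet? ((PySem.List.pyGet? g (x + (t + 1) * dx)).getD []) (y + (t + 1) * dy)).getD "" ≠ "."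
        · rw [if_pos hv, if_pos hv, srB_foldl_some]
          simp [PySem.Dict.getD_insert_self]
        · rw [if_neg hv, if_neg hv]
          exact ih (t + 1)
      · rw [if_pos hb, hx, hy, if_neg hb, srB_foldl_some]
        rfl

-- ===== VERDICT =====
theorem surrounding_recursive_spec : Claim_equal_surrounding_recursive := by
  intro g x y dx dy cache _
  unfold Spec_surrounding_recursive surrounding_recursive surrounding_recursive_alt
  have h := srB_fold_eq_srA g x y dx dy (PySem.Dict.mk (cache.getD []))
    (g.length + (g.headD []).length + 2) 0
  have hb : (0 : Int) + ((g.length + (g.headD []).length + 2 : Nat) : Int)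
      = (g.length : Int) + ((g.headD []).length : Int) + 2 := by push_cast; ring
  rw [hb] at h
  simpa using h.symm
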